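-- pv_equiv track=rewrite | github.com/Adithya1911/COL100-24-25 | Labs.questions.py | count_balanced_sub_matrices
-- ===== SOURCE A (Python) =====
-- def count_zero_sum_intervals(L):
--     memo = {}
--     memo[0] = 1
--     sm = 0
--     ans = 0
--     for i in range(len(L)):
--         sm += L[i]
--         if sm in memo:
--             ans += memo[sm]
--             memo[sm] += 1
--         else:
--             memo[sm] = 1
--     return ans
--
-- def count_balanced_sub_matrices(matrix):
--     n = len(matrix)
--     answer = 0
--     for i in range(n):
--         sums = [0] * n
--         for j in range(i, n):
--             for k in range(n):
--                 sums[k] += -1 if matrix[j][k] == 'B' else 1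
--             answer += count_zero_sum_intervals(sums)
--     return answer
-- ===== SOURCE B (Python) =====
-- def count_balanced_sub_matrices(matrix):
--     n = len(matrix)
--     ans = 0
--     for r1 in range(n):
--         for r2 in range(r1, n):
--             pref = [0] * (n + 1)
--             for k in range(n):
--                 band = sum(-1 if matrix[j][k] == 'B' else 1 for j in range(r1, r2 + 1))
--                 pref[k + 1] = pref[k] + band
--             for c1 in range(n):
--                 for c2 in range(c1, n):
--                     if pref[c2 + 1] == pref[c1]:
--                         ans += 1
--     return ans
-- ===== Notes on version B (the rewrite author's own statement) =====
-- stated objective: alternative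
-- what changed: Replaces the incremental column-sum accumulator and hashmap zero-sum-interval counter with direct enumeration of all row pairs, an explicit prefix-sum array per row band, and a double loop over column pairs testing equal prefix sums.
import Mathlib
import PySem

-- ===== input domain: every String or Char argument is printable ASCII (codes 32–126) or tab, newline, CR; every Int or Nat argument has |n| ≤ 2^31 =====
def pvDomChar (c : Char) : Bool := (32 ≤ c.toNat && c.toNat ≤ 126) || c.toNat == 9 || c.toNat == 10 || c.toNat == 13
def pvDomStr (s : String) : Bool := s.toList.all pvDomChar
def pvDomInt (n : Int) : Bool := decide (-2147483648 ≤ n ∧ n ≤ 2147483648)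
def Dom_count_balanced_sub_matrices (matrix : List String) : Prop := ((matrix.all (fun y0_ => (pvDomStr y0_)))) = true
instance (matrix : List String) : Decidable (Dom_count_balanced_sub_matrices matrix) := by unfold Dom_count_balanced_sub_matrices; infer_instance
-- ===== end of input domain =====

-- B replaces A's incremental column-sum accumulator and hashmap interval counter by direct
-- enumeration of row bands with an explicit prefix-sum array and a double loop over column
-- pairs (objective: alternative algorithm, similar size, not faster).

-- ===== PORT A =====
-- helper of A: count_zero_sum_intervals (hashmap of running-sum frequencies)
def pv_czsi (L : List Int) : Int :=
  ((PySem.List.pyRange 0 (L.length : Int) 1).foldl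
    (fun (st : PySem.Dict Int Int × Int × Int) i =>
      let sm := st.2.1 + PySem.List.pyGetD L i 0
      match st.1.get? sm with
      | some v => (st.1.insert sm (v + 1), sm, st.2.2 + v)
      | none   => (st.1.insert sm 1, sm, st.2.2))
    (PySem.Dict.empty.insert 0 1, 0, 0)).2.2

def count_balanced_sub_matrices (matrix : List String) : Int :=
  (PySem.List.pyRange 0 (matrix.length : Int) 1).foldl
    (fun answer i =>
      ((PySem.List.pyRange i (matrix.length : Int) 1).foldl
        (fun (st : List Int × Int) j =>
          let sums := (PySem.List.pyRange 0 (matrix.length : Int) 1).foldl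
            (fun sums k =>
              PySem.List.pySetD sums k (PySem.List.pyGetD sums k 0 +
                (if PySem.Str.pyGet? (PySem.List.pyGetD matrix j "") k = some 'B'
                 then (-1 : Int) else 1)))
            st.1
          (sums, st.2 + pv_czsi sums))
        (List.replicate matrix.length (0 : Int), answer)).2)
    0

-- ===== PORT B =====
def count_balanced_sub_matrices_alt (matrix : List String) : Int :=
  (PySem.List.pyRange 0 (matrix.length : Int) 1).foldl
    (fun ans r1 =>
      (PySem.List.pyRange r1 (matrix.length : Int) 1).foldl
        (fun ans r2 =>
          let pref := (PySem.List.pyRange 0 (matrix.length : Int) 1).foldl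
            (fun pref k =>
              PySem.List.pySetD pref (k + 1) (PySem.List.pyGetD pref k 0 +
                ((PySem.List.pyRange r1 (r2 + 1) 1).map
                  (fun j => if PySem.Str.pyGet? (PySem.List.pyGetD matrix j "") k = some 'B'
                            then (-1 : Int) else 1)).sum))
            (List.replicate (matrix.length + 1) (0 : Int))
          (PySem.List.pyRange 0 (matrix.length : Int) 1).foldl
            (fun ans c1 =>
              (PySem.List.pyRange c1 (matrix.length : Int) 1).foldl
                (fun ans c2 =>
                  if PySem.List.pyGetD pref (c2 + 1) 0 = PySem.List.pyGetD pref c1 0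
                  then ans + 1 else ans)
                ans)
            ans)
        ans)
    0

-- ===== PRECONDITION & SPEC =====
-- Pre_ excludes only inputs where the Python A raises IndexError: a row shorter than the
-- number of rows makes matrix[j][k] raise for some k < n.
def Pre_count_balanced_sub_matrices (matrix : List String) : Prop :=
  ∀ s ∈ matrix, matrix.length ≤ s.toList.length
instance (matrix : List String) : Decidable (Pre_count_balanced_sub_matrices matrix) := by
  unfold Pre_count_balanced_sub_matrices; infer_instance
def pvWitness_count_balanced_sub_matrices : List String := ["BW", "WB"]
def Spec_count_balanced_sub_matrices (matrix : List String) (out : Int) : Prop := out = count_balanced_sub_matrices_alt matrix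
instance (matrix : List String) (out : Int) : Decidable (Spec_count_balanced_sub_matrices matrix out) := by unfold Spec_count_balanced_sub_matrices; infer_instance

-- ===== CLAIM (what is proved, stated in full; the proofs are below) =====
def Claim_equal_count_balanced_sub_matrices : Prop := ∀ (matrix : List String), Dom_count_balanced_sub_matrices matrix → Pre_count_balanced_sub_matrices matrix → Spec_count_balanced_sub_matrices matrix (count_balanced_sub_matrices matrix)

-- ===== LEMMAS AND PROOFS =====

-- the value of one cell, as both ports compute it
def pv_cell (matrix : List String) (j k : Int) : Int :=
  if PySem.Str.pyGet? (PySem.List.pyGetD matrix j "") k = some 'B' then (-1 : Int) else 1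

-- column sum of column k over rows [i, j)
def pv_band (matrix : List String) (i j k : Int) : Int :=
  ((PySem.List.pyRange i j 1).map (fun r => pv_cell matrix r k)).sum

-- the list of column sums over rows [i, j)
def pv_msum (matrix : List String) (i j : Int) : List Int :=
  (List.range matrix.length).map (fun k : Nat => pv_band matrix i j (k : Int))

-- number of u < t with prefix sum of M at u equal to s
def pv_pcnt (M : List Int) (t : Nat) (s : Int) : Int :=
  ∑ u ∈ Finset.range t, (if (M.take u).sum = s then (1 : Int) else 0)

-- B's per-band count: pairs c1 ≤ c2 with equal bracketing prefix sums
def pv_bcnt (M : List Int) : Int :=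
  ∑ u ∈ Finset.range M.length, ∑ c ∈ Finset.Ico u M.length,
    (if (M.take (c + 1)).sum = (M.take u).sum then (1 : Int) else 0)

theorem pv_upd_map_aux (n : Nat) (f : Nat → Int) (g : Int → Int) :
    ∀ (m : Nat), m ≤ n →
    (PySem.List.pyRange 0 (m : Int) 1).foldl
      (fun s k => PySem.List.pySetD s k (PySem.List.pyGetD s k 0 + g k))
      ((List.range n).map f)
      = (List.range n).map (fun k => if k < m then f k + g (k : Int) else f k) := by
  intro m
  induction m with
  | zero => intro _; simp [PySem.List.pyRange_one_eq_nil]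
  | succ m ih =>
      intro hm
      have h1 : ((m : Int) + 1) = ((m + 1 : Nat) : Int) := by push_cast; ring
      rw [← h1, PySem.List.pyRange_one_succ_right (by positivity), List.foldl_append, ih (by omega)]
      simp only [List.foldl_cons, List.foldl_nil]
      rw [PySem.List.pyGetD_natCast, PySem.List.pySetD_natCast]
      rw [PySem.List.getD_map_range _ _ _ _ (by omega)]
      apply List.ext_getElem
      · simp
      · intro t h1' h2'
        simp only [List.getElem_set, List.getElem_map, List.getElem_range]
        by_cases ht : t = m
        · subst ht; simp
        · rw [if_neg (fun h => ht h.symm)]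
          by_cases h3 : t < m
          · simp [h3, show t < m + 1 by omega]
          · simp [h3, show ¬ (t < m + 1) by omega]

-- A's inner-loop step on one element of L
def pv_stepC (st : PySem.Dict Int Int × Int × Int) (x : Int) :
    PySem.Dict Int Int × Int × Int :=
  let sm := st.2.1 + x
  match st.1.get? sm with
  | some v => (st.1.insert sm (v + 1), sm, st.2.2 + v)
  | none   => (st.1.insert sm 1, sm, st.2.2)

-- A's middle-loop step on one row index j
def pv_stepA (matrix : List String) (st : List Int × Int) (j : Int) : List Int × Int :=
  let sums := (PySem.List.pyRange 0 (matrix.length : Int) 1).foldl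
    (fun sums k =>
      PySem.List.pySetD sums k (PySem.List.pyGetD sums k 0 +
        (if PySem.Str.pyGet? (PySem.List.pyGetD matrix j "") k = some 'B'
         then (-1 : Int) else 1)))
    st.1
  (sums, st.2 + pv_czsi sums)

theorem pv_swapSum (n : ℕ) (g : ℕ → ℕ → ℤ) :
    ∑ c ∈ Finset.range n, ∑ u ∈ Finset.range (c+1), g u c
      = ∑ u ∈ Finset.range n, ∑ c ∈ Finset.Ico u n, g u c := by
  induction n with
  | zero => simp
  | succ n ih =>
      rw [Finset.sum_range_succ, ih, Finset.sum_range_succ (fun u => ∑ c ∈ Finset.Ico u (n+1), g u c)]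
      have h1 : ∀ u ∈ Finset.range n, ∑ c ∈ Finset.Ico u (n+1), g u c
          = (∑ c ∈ Finset.Ico u n, g u c) + g u n := by
        intro u hu
        rw [Finset.sum_Ico_succ_top (le_of_lt (Finset.mem_range.mp hu))]
      rw [Finset.sum_congr rfl h1, Finset.sum_add_distrib, Finset.sum_Ico_succ_top (le_refl n)]
      rw [Finset.sum_range_succ (fun u => g u n)]
      simp
      ring

theorem pv_countP_toInt (m : ℕ) (q : ℕ → Bool) :
    ((List.range m).countP q : ℤ) = ∑ i ∈ Finset.range m, (if q i then (1 : ℤ) else 0) := by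
  induction m with
  | zero => simp
  | succ m ih =>
      rw [Finset.sum_range_succ, List.range_succ, List.countP_append, ← ih]
      by_cases h : q m <;> simp [h]

theorem pv_czsi_loop (M : List Int) : ∀ (m p : Nat), p + m = M.length →
    ∀ (memo : PySem.Dict Int Int) (ans : Int),
    (∀ s : Int, ((memo.get? s).getD 0) = pv_pcnt M (p + 1) s) →
    ((M.drop p).foldl pv_stepC (memo, (M.take p).sum, ans)).2.2
      = ans + ∑ v ∈ Finset.Ico (p + 1) (M.length + 1), pv_pcnt M v ((M.take v).sum) := by
  intro m
  induction m with
  | zero =>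
      intro p hp memo ans _
      rw [show p = M.length by omega, List.drop_length]
      simp
  | succ m ih =>
      intro p hp memo ans hinv
      have hplt : p < M.length := by omega
      have hsm : (M.take p).sum + M[p] = (M.take (p + 1)).sum := by
        rw [List.take_add_one, List.getElem?_eq_getElem hplt, List.sum_append]
        norm_num
      have hpcnt_succ : ∀ s : Int, pv_pcnt M (p + 2) s
          = pv_pcnt M (p + 1) s + (if (M.take (p + 1)).sum = s then (1 : Int) else 0) := by
        intro s; unfold pv_pcnt; rw [Finset.sum_range_succ]
      rw [List.drop_eq_getElem_cons hplt, List.foldl_cons]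
      cases hg : memo.get? ((M.take (p+1)).sum) with
      | some v =>
          have hv : v = pv_pcnt M (p + 1) ((M.take (p+1)).sum) := by
            have := hinv ((M.take (p+1)).sum); rw [hg] at this; simpa using this
          have hstep : pv_stepC (memo, (M.take p).sum, ans) M[p]
              = (memo.insert ((M.take (p+1)).sum) (v + 1), (M.take (p+1)).sum, ans + v) := by
            unfold pv_stepC; simp only [hsm, hg]
          have hinv' : ∀ s : Int, (((memo.insert ((M.take (p+1)).sum) (v + 1)).get? s).getD 0) = pv_pcnt M (p + 1 + 1) s := by
            intro s
            rw [show p + 1 + 1 = p + 2 from rfl, hpcnt_succ s, PySem.Dict.get?_insert]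
            by_cases hs : s = (M.take (p+1)).sum
            · subst hs
              simp [hv]
            · rw [if_neg hs, hinv s, if_neg (fun h => hs h.symm)]
              ring
          rw [hstep, ih (p+1) (by omega) _ _ hinv']
          rw [Finset.sum_eq_sum_Ico_succ_bot (show p + 1 < M.length + 1 by omega)]
          rw [hv]; ring
      | none =>
          have hv : (0:Int) = pv_pcnt M (p + 1) ((M.take (p+1)).sum) := by
            have := hinv ((M.take (p+1)).sum); rw [hg] at this; simpa using this
          have hstep : pv_stepC (memo, (M.take p).sum, ans) M[p]
              = (memo.insert ((M.take (p+1)).sum) 1, (M.take (p+1)).sum, ans) := by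
            unfold pv_stepC; simp only [hsm, hg]
          have hinv' : ∀ s : Int, (((memo.insert ((M.take (p+1)).sum) 1).get? s).getD 0) = pv_pcnt M (p + 1 + 1) s := by
            intro s
            rw [show p + 1 + 1 = p + 2 from rfl, hpcnt_succ s, PySem.Dict.get?_insert]
            by_cases hs : s = (M.take (p+1)).sum
            · subst hs
              simp [← hv]
            · rw [if_neg hs, hinv s, if_neg (fun h => hs h.symm)]
              ring
          rw [hstep, ih (p+1) (by omega) _ _ hinv']
          rw [Finset.sum_eq_sum_Ico_succ_bot (show p + 1 < M.length + 1 by omega)]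
          rw [← hv]; ring

theorem pv_czsi_eq (M : List Int) :
    pv_czsi M = ∑ v ∈ Finset.Ico 1 (M.length + 1), pv_pcnt M v ((M.take v).sum) := by
  have h0 : pv_czsi M
      = ((M.drop 0).foldl pv_stepC (PySem.Dict.empty.insert 0 1, (M.take 0).sum, 0)).2.2 := by
    unfold pv_czsi
    rw [List.drop_zero, ← PySem.List.foldl_pyRange_zero_pyGetD' M 0 pv_stepC]
    rfl
  have hinv0 : ∀ s : Int, (((PySem.Dict.empty.insert (0:Int) (1:Int)).get? s).getD 0)
      = pv_pcnt M (0 + 1) s := by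
    intro s
    have hp : pv_pcnt M (0 + 1) s = if (0:Int) = s then 1 else 0 := by
      unfold pv_pcnt; rw [Finset.sum_range_one]; simp
    rw [hp, PySem.Dict.get?_insert]
    by_cases hs : s = 0
    · subst hs; simp
    · rw [if_neg hs, PySem.Dict.get?_empty, if_neg (fun h : (0:Int) = s => hs h.symm)]
      rfl
  rw [h0, pv_czsi_loop M M.length 0 (by omega) _ _ hinv0]
  rw [zero_add]

theorem pv_czsi_eq_bcnt (M : List Int) : pv_czsi M = pv_bcnt M := by
  rw [pv_czsi_eq, Finset.sum_Ico_eq_sum_range]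
  simp only [Nat.add_sub_cancel]
  have h1 : ∀ c ∈ Finset.range M.length,
      pv_pcnt M (1 + c) ((M.take (1 + c)).sum)
        = ∑ u ∈ Finset.range (c + 1),
            (if (M.take u).sum = (M.take (c + 1)).sum then (1:Int) else 0) := by
    intro c _
    rw [Nat.add_comm 1 c]
    rfl
  rw [Finset.sum_congr rfl h1, pv_swapSum M.length
    (fun u c => if (M.take u).sum = (M.take (c + 1)).sum then (1:Int) else 0)]
  unfold pv_bcnt
  apply Finset.sum_congr rfl
  intro u _
  apply Finset.sum_congr rfl
  intro c _
  exact if_congr eq_comm rfl rfl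

theorem pv_upd_map (n : Nat) (f : Nat → Int) (g : Int → Int) :
    (PySem.List.pyRange 0 (n : Int) 1).foldl
      (fun s k => PySem.List.pySetD s k (PySem.List.pyGetD s k 0 + g k))
      ((List.range n).map f)
      = (List.range n).map (fun k => f k + g (k : Int)) := by
  rw [pv_upd_map_aux n f g n (le_refl n)]
  apply List.map_congr_left
  intro k hk
  rw [if_pos (List.mem_range.mp hk)]

theorem pv_pref_build_aux (n : Nat) (g : Int → Int) :
    ∀ (m : Nat), m ≤ n →
    (PySem.List.pyRange 0 (m : Int) 1).foldl
      (fun pref k => PySem.List.pySetD pref (k + 1) (PySem.List.pyGetD pref k 0 + g k))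
      (List.replicate (n + 1) (0 : Int))
      = (List.range (n + 1)).map
          (fun t => if t ≤ m then ((List.range t).map (fun k : Nat => g (k : Int))).sum else 0) := by
  intro m
  induction m with
  | zero =>
      intro _
      rw [PySem.List.pyRange_one_eq_nil (by simp), List.foldl_nil]
      apply List.ext_getElem
      · simp
      · intro t h1 h2
        simp only [List.getElem_replicate, List.getElem_map, List.getElem_range]
        by_cases ht : t = 0
        · subst ht; simp
        · simp [show ¬ t ≤ 0 by omega]
  | succ m ih =>
      intro hm
      have h1 : ((m : Int) + 1) = ((m + 1 : Nat) : Int) := by push_cast; ring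
      rw [← h1, PySem.List.pyRange_one_succ_right (by positivity), List.foldl_append, ih (by omega)]
      simp only [List.foldl_cons, List.foldl_nil]
      rw [PySem.List.pyGetD_natCast, h1, PySem.List.pySetD_natCast]
      rw [PySem.List.getD_map_range _ _ _ _ (by omega)]
      apply List.ext_getElem
      · simp
      · intro t h1' h2'
        simp only [List.getElem_set, List.getElem_map, List.getElem_range]
        by_cases ht : t = m + 1
        · subst ht
          simp only [if_pos (le_refl (m+1)), if_pos (show m ≤ m from le_refl m)]
          simp [List.range_succ]
        · rw [if_neg (fun h => ht h.symm)]
          by_cases h3 : t ≤ m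
          · simp [h3, show t ≤ m + 1 by omega]
          · simp [h3, show ¬ (t ≤ m + 1) by omega]

theorem pv_pref_build (n : Nat) (g : Int → Int) :
    (PySem.List.pyRange 0 (n : Int) 1).foldl
      (fun pref k => PySem.List.pySetD pref (k + 1) (PySem.List.pyGetD pref k 0 + g k))
      (List.replicate (n + 1) (0 : Int))
      = (List.range (n + 1)).map (fun t => ((List.range t).map (fun k : Nat => g (k : Int))).sum) := by
  rw [pv_pref_build_aux n g n (le_refl n)]
  apply List.map_congr_left
  intro t ht
  rw [if_pos (by have := List.mem_range.mp ht; omega : t ≤ n)]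


theorem pv_band_succ (matrix : List String) (i j k : Int) (hij : i ≤ j) :
    pv_band matrix i (j + 1) k = pv_band matrix i j k + pv_cell matrix j k := by
  unfold pv_band
  rw [PySem.List.pyRange_one_succ_right hij, List.map_append, List.sum_append]
  simp

theorem pv_msum_self (matrix : List String) (i : Int) :
    pv_msum matrix i i = List.replicate matrix.length (0 : Int) := by
  unfold pv_msum pv_band
  rw [PySem.List.pyRange_one_eq_nil (le_refl i)]
  simp [List.map_const']

theorem pv_cnt_Ico (n u : Nat) (p : Int → Prop) [DecidablePred p] :
    (((PySem.List.pyRange (u : Int) (n : Int) 1).countP (fun x => decide (p x))) : Int)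
      = ∑ c ∈ Finset.Ico u n, (if p (c : Int) then (1 : Int) else 0) := by
  rw [PySem.List.pyRange_one, List.countP_map, Finset.sum_Ico_eq_sum_range]
  have ht : ((n : Int) - (u : Int)).toNat = n - u := by omega
  rw [ht, pv_countP_toInt (n - u) _]
  apply Finset.sum_congr rfl
  intro i _
  simp [Function.comp]

theorem pv_count_pairs (n : Nat) (P : Int → Int) (ans : Int) :
    (PySem.List.pyRange 0 (n : Int) 1).foldl
      (fun ans c1 => (PySem.List.pyRange c1 (n : Int) 1).foldl
        (fun ans c2 => if P (c2 + 1) = P c1 then ans + 1 else ans) ans) ans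
      = ans + ∑ u ∈ Finset.range n, ∑ c ∈ Finset.Ico u n,
          (if P ((c : Int) + 1) = P (u : Int) then (1 : Int) else 0) := by
  have h1 : ∀ (a : Int) (c1 : Int), (PySem.List.pyRange c1 (n : Int) 1).foldl
      (fun ans c2 => if P (c2 + 1) = P c1 then ans + 1 else ans) a
      = a + ((PySem.List.pyRange c1 (n : Int) 1).countP (fun c2 => decide (P (c2 + 1) = P c1)) : Int) :=
    fun a c1 => PySem.List.foldl_ite_add_one (fun c2 => P (c2 + 1) = P c1) _ a
  rw [PySem.List.foldl_congr_mem _ _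
    (fun a c1 => a + ((PySem.List.pyRange c1 (n : Int) 1).countP (fun c2 => decide (P (c2 + 1) = P c1)) : Int)) _
    (fun a c1 _ => h1 a c1)]
  rw [PySem.List.foldl_add]
  congr 1
  rw [PySem.List.pyRange_zero, Int.toNat_natCast, List.map_map]
  show ∑ u ∈ Finset.range n, _ = _
  apply Finset.sum_congr rfl
  intro u _
  exact pv_cnt_Ico n u (fun x => P (x + 1) = P (u : Int))

theorem pv_A_inner (matrix : List String) (i : Int) : ∀ (m : Nat) (j : Int), i ≤ j →
    j + m = matrix.length → ∀ ans : Int,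
    ((PySem.List.pyRange j (matrix.length : Int) 1).foldl (pv_stepA matrix)
        (pv_msum matrix i j, ans)).2
      = ans + ((PySem.List.pyRange j (matrix.length : Int) 1).map
          (fun j' => pv_czsi (pv_msum matrix i (j' + 1)))).sum := by
  intro m
  induction m with
  | zero =>
      intro j _ hj ans
      rw [PySem.List.pyRange_one_eq_nil (by omega : (matrix.length : Int) ≤ j)]
      simp
  | succ m ih =>
      intro j hij hj ans
      have hjlt : j < (matrix.length : Int) := by omega
      rw [PySem.List.pyRange_one_cons hjlt, List.foldl_cons, List.map_cons, List.sum_cons]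
      have hsums : (PySem.List.pyRange 0 (matrix.length : Int) 1).foldl
          (fun sums k =>
            PySem.List.pySetD sums k (PySem.List.pyGetD sums k 0 +
              (if PySem.Str.pyGet? (PySem.List.pyGetD matrix j "") k = some 'B'
               then (-1 : Int) else 1)))
          (pv_msum matrix i j)
          = pv_msum matrix i (j + 1) := by
        unfold pv_msum
        rw [pv_upd_map matrix.length (fun k => pv_band matrix i j (k : Int))
          (fun k => if PySem.Str.pyGet? (PySem.List.pyGetD matrix j "") k = some 'B'
                    then (-1 : Int) else 1)]
        apply List.map_congr_left
        intro k _
        exact (pv_band_succ matrix i j (k : Int) hij).symm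
      have hstep : pv_stepA matrix (pv_msum matrix i j, ans) j
          = (pv_msum matrix i (j + 1), ans + pv_czsi (pv_msum matrix i (j + 1))) := by
        unfold pv_stepA
        dsimp only
        rw [hsums]
      rw [hstep, ih (j + 1) (by omega) (by omega) (ans + pv_czsi (pv_msum matrix i (j + 1)))]
      ring

theorem pv_A_closed (matrix : List String) :
    count_balanced_sub_matrices matrix
      = ((PySem.List.pyRange 0 (matrix.length : Int) 1).map
          (fun i => ((PySem.List.pyRange i (matrix.length : Int) 1).map
            (fun j => pv_czsi (pv_msum matrix i (j + 1)))).sum)).sum := by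
  unfold count_balanced_sub_matrices
  rw [show (fun (st : List Int × Int) (j : Int) =>
      let sums := (PySem.List.pyRange 0 (matrix.length : Int) 1).foldl
        (fun sums k =>
          PySem.List.pySetD sums k (PySem.List.pyGetD sums k 0 +
            (if PySem.Str.pyGet? (PySem.List.pyGetD matrix j "") k = some 'B'
             then (-1 : Int) else 1)))
        st.1
      (sums, st.2 + pv_czsi sums)) = pv_stepA matrix from rfl]
  have hbody : ∀ (answer : Int), ∀ i ∈ PySem.List.pyRange 0 (matrix.length : Int) 1,
      ((PySem.List.pyRange i (matrix.length : Int) 1).foldl (pv_stepA matrix)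
          (List.replicate matrix.length (0 : Int), answer)).2
        = answer + ((PySem.List.pyRange i (matrix.length : Int) 1).map
            (fun j => pv_czsi (pv_msum matrix i (j + 1)))).sum := by
    intro answer i hi
    obtain ⟨hi0, hilt⟩ := PySem.List.mem_pyRange_one.mp hi
    rw [← pv_msum_self matrix i]
    exact pv_A_inner matrix i ((matrix.length : Int) - i).toNat i (le_refl i) (by omega) answer
  rw [PySem.List.foldl_congr_mem _ _
    (fun answer i => answer + ((PySem.List.pyRange i (matrix.length : Int) 1).map
      (fun j => pv_czsi (pv_msum matrix i (j + 1)))).sum) _ hbody]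
  rw [PySem.List.foldl_add]
  rw [zero_add]

theorem pv_B_closed (matrix : List String) :
    count_balanced_sub_matrices_alt matrix
      = ((PySem.List.pyRange 0 (matrix.length : Int) 1).map
          (fun i => ((PySem.List.pyRange i (matrix.length : Int) 1).map
            (fun j => pv_bcnt (pv_msum matrix i (j + 1)))).sum)).sum := by
  unfold count_balanced_sub_matrices_alt
  have hlen : ∀ (r1 r2 : Int), (pv_msum matrix r1 r2).length = matrix.length := by
    intro r1 r2; unfold pv_msum; simp
  have htake : ∀ (r1 j : Int) (t : Nat), t ≤ matrix.length →
      ((List.range t).map (fun k : Nat => pv_band matrix r1 j (k : Int))).sum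
        = ((pv_msum matrix r1 j).take t).sum := by
    intro r1 j t ht
    unfold pv_msum
    rw [← List.map_take, List.take_range, Nat.min_eq_left ht]
  have hbody : ∀ (ans : Int), ∀ r1 ∈ PySem.List.pyRange 0 (matrix.length : Int) 1,
      (PySem.List.pyRange r1 (matrix.length : Int) 1).foldl
        (fun ans r2 =>
          let pref := (PySem.List.pyRange 0 (matrix.length : Int) 1).foldl
            (fun pref k =>
              PySem.List.pySetD pref (k + 1) (PySem.List.pyGetD pref k 0 +
                ((PySem.List.pyRange r1 (r2 + 1) 1).map
                  (fun j => if PySem.Str.pyGet? (PySem.List.pyGetD matrix j "") k = some 'B'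
                            then (-1 : Int) else 1)).sum))
            (List.replicate (matrix.length + 1) (0 : Int))
          (PySem.List.pyRange 0 (matrix.length : Int) 1).foldl
            (fun ans c1 =>
              (PySem.List.pyRange c1 (matrix.length : Int) 1).foldl
                (fun ans c2 =>
                  if PySem.List.pyGetD pref (c2 + 1) 0 = PySem.List.pyGetD pref c1 0
                  then ans + 1 else ans)
                ans)
            ans)
        ans
      = ans + ((PySem.List.pyRange r1 (matrix.length : Int) 1).map
          (fun r2 => pv_bcnt (pv_msum matrix r1 (r2 + 1)))).sum := by
    intro ans r1 _
    have hb : ∀ (a : Int), ∀ r2 ∈ PySem.List.pyRange r1 (matrix.length : Int) 1,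
        (let pref := (PySem.List.pyRange 0 (matrix.length : Int) 1).foldl
            (fun pref k =>
              PySem.List.pySetD pref (k + 1) (PySem.List.pyGetD pref k 0 +
                ((PySem.List.pyRange r1 (r2 + 1) 1).map
                  (fun j => if PySem.Str.pyGet? (PySem.List.pyGetD matrix j "") k = some 'B'
                            then (-1 : Int) else 1)).sum))
            (List.replicate (matrix.length + 1) (0 : Int))
         (PySem.List.pyRange 0 (matrix.length : Int) 1).foldl
            (fun ans c1 =>
              (PySem.List.pyRange c1 (matrix.length : Int) 1).foldl
                (fun ans c2 =>
                  if PySem.List.pyGetD pref (c2 + 1) 0 = PySem.List.pyGetD pref c1 0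
                  then ans + 1 else ans)
                ans)
            a)
        = a + pv_bcnt (pv_msum matrix r1 (r2 + 1)) := by
      intro a r2 _
      have key : ∀ (pref : List Int),
          (∀ t : Nat, t ≤ matrix.length →
            PySem.List.pyGetD pref (t : Int) 0 = ((pv_msum matrix r1 (r2 + 1)).take t).sum) →
          (PySem.List.pyRange 0 (matrix.length : Int) 1).foldl
            (fun ans c1 =>
              (PySem.List.pyRange c1 (matrix.length : Int) 1).foldl
                (fun ans c2 =>
                  if PySem.List.pyGetD pref (c2 + 1) 0 = PySem.List.pyGetD pref c1 0
                  then ans + 1 else ans)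
                ans)
            a
          = a + pv_bcnt (pv_msum matrix r1 (r2 + 1)) := by
        intro pref hpref
        rw [pv_count_pairs matrix.length (fun x => PySem.List.pyGetD pref x 0) a]
        congr 1
        unfold pv_bcnt
        rw [hlen r1 (r2 + 1)]
        apply Finset.sum_congr rfl
        intro u hu
        apply Finset.sum_congr rfl
        intro c hc
        have hu' : u ≤ matrix.length := le_of_lt (Finset.mem_range.mp hu)
        have hc' : c + 1 ≤ matrix.length := (Finset.mem_Ico.mp hc).2
        have h1 : ((c : Int) + 1) = ((c + 1 : Nat) : Int) := by push_cast; ring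
        rw [h1, hpref (c + 1) hc', hpref u hu']
      apply key
      intro t ht
      rw [pv_pref_build matrix.length
        (fun k => ((PySem.List.pyRange r1 (r2 + 1) 1).map
          (fun j => if PySem.Str.pyGet? (PySem.List.pyGetD matrix j "") k = some 'B'
                    then (-1 : Int) else 1)).sum)]
      rw [PySem.List.pyGetD_natCast, PySem.List.getD_map_range _ _ _ _ (by omega)]
      exact htake r1 (r2 + 1) t ht
    rw [PySem.List.foldl_congr_mem _ _
      (fun a r2 => a + pv_bcnt (pv_msum matrix r1 (r2 + 1))) _ hb]
    rw [PySem.List.foldl_add]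
  rw [PySem.List.foldl_congr_mem _ _
    (fun ans r1 => ans + ((PySem.List.pyRange r1 (matrix.length : Int) 1).map
      (fun r2 => pv_bcnt (pv_msum matrix r1 (r2 + 1)))).sum) _ hbody]
  rw [PySem.List.foldl_add]
  rw [zero_add]

-- ===== VERDICT (by name: the statement is the Claim_ definition above) =====
theorem count_balanced_sub_matrices_spec : Claim_equal_count_balanced_sub_matrices := by
  intro matrix _ _
  unfold Spec_count_balanced_sub_matrices
  rw [pv_A_closed, pv_B_closed]
  have h : pv_czsi = pv_bcnt := funext pv_czsi_eq_bcnt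
  rw [h]
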